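-- pv_equiv track=rewrite | github.com/salomonw/contraflow-lane-reversal | solver.py | obtain_sol
-- ===== SOURCE A (Python) =====
-- def obtain_sol(sol, n):
-- 	M = [[0 for j in range(n)] for i in range(n)]
-- 	for i in range(n):
-- 		for j in range(n):
-- 			for v in range(n):
-- 				val = sol[i, j, v]
-- 				if val == 1:
-- 					M[i][j] = v+1
-- 					break
-- 	return M
-- ===== SOURCE B (Python) =====
-- def obtain_sol(sol, n):
-- 	best = {}
-- 	for (i, j, v), val in sol.items():
-- 		if val == 1 and 0 <= i < n and 0 <= j < n and 0 <= v < n: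
-- 			if (i, j) not in best or v < best[(i, j)]:
-- 				best[(i, j)] = v
-- 	return [[best.get((i, j), -1) + 1 for j in range(n)] for i in range(n)]
-- ===== Notes on version B (the rewrite author's own statement) =====
-- stated objective: alternative
-- what changed: A scans the full n^3 index cube with a triple nested loop, one dict lookup per (i,j,v), breaking at the first 1; B instead makes a single pass over sol's own items, accumulating in a hash map the minimal matching v per (i,j), then builds the matrix by n^2 lookups.
import Mathlib
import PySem

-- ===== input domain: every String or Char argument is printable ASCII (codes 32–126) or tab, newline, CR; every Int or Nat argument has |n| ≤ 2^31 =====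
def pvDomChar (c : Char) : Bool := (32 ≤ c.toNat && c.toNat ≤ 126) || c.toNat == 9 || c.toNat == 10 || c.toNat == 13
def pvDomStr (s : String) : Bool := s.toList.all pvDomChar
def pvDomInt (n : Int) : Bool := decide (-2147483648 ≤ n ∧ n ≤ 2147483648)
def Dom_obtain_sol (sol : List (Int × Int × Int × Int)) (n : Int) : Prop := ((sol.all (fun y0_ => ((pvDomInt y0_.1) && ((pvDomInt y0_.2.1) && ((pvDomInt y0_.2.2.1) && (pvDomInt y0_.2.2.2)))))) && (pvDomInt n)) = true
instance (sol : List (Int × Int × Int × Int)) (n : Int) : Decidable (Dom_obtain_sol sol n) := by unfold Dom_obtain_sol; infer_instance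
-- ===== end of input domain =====

-- B replaces A's triple loop over the index cube (one dict lookup per (i, j, v), break at the
-- first 1) by a single pass over sol's own items accumulating the minimal matching v per (i, j)
-- in a map, then n^2 lookups build the matrix — an alternative algorithm, not claimed faster.

-- ===== PORT A =====
-- sol[i, j, v]: first-match lookup of key (i, j, v) in the association list; the total
-- default 0 is only taken where Python raises KeyError, which Pre_obtain_sol excludes.
def solGet (sol : List (Int × Int × Int × Int)) (i j v : Int) : Int :=
  ((sol.find? (fun q => q.1 == i && q.2.1 == j && q.2.2.1 == v)).map (fun q => q.2.2.2)).getD 0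

-- M[i][j] = x  (two-level indexed write, as A performs it)
def setCell (M : List (List Int)) (i j : Int) (x : Int) : List (List Int) :=
  PySem.List.pySetD M i (PySem.List.pySetD (PySem.List.pyGetD M i []) j x)

-- A's inner 'for v in range(n): … break' loop
def loopA (sol : List (Int × Int × Int × Int)) (i j : Int) : List Int → List (List Int) → List (List Int)
  | [], M => M
  | v :: vs, M => if solGet sol i j v == 1 then setCell M i j (v + 1) else loopA sol i j vs M

def obtain_sol (sol : List (Int × Int × Int × Int)) (n : Int) : List (List Int) :=
  let M := (PySem.List.pyRange 0 n 1).map (fun _ => (PySem.List.pyRange 0 n 1).map (fun _ => (0 : Int)))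
  (PySem.List.pyRange 0 n 1).foldl (fun M i =>
    (PySem.List.pyRange 0 n 1).foldl (fun M j =>
      loopA sol i j (PySem.List.pyRange 0 n 1) M) M) M

-- ===== PORT B =====
-- B's accumulation loop: 'for (i, j, v), val in sol.items(): …' building best[(i, j)] = min v
def loopB (n : Int) : List (Int × Int × Int × Int) → PySem.Dict (Int × Int) Int → PySem.Dict (Int × Int) Int
  | [], best => best
  | (i, j, v, val) :: rest, best =>
      loopB n rest
        (if val = 1 ∧ 0 ≤ i ∧ i < n ∧ 0 ≤ j ∧ j < n ∧ 0 ≤ v ∧ v < n then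
           if best.contains (i, j) = false ∨ v < best.getD (i, j) 0 then best.insert (i, j) v
           else best
         else best)

def obtain_sol_alt (sol : List (Int × Int × Int × Int)) (n : Int) : List (List Int) :=
  let best := loopB n sol PySem.Dict.empty
  (PySem.List.pyRange 0 n 1).map (fun i =>
    (PySem.List.pyRange 0 n 1).map (fun j => best.getD (i, j) (-1) + 1))

-- ===== PRECONDITION & SPEC =====
-- Pre_: exactly the inputs on which the Python A returns without KeyError — for every cell
-- (i, j), every v is reached only while no earlier v carried value 1, and each reached key
-- must be present; plus: the association list has no duplicate (i, j, v) keys, which a Python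
-- dict cannot have (on duplicate-key lists the encoded dict is ambiguous, first-vs-last match).
-- The first conjunct does not narrow the condition (for 0 < n the cell condition for the n^2
-- cells already forces n ≤ n^2 ≤ sol.length); it only lets the instance decide fast for huge n.
def Pre_obtain_sol (sol : List (Int × Int × Int × Int)) (n : Int) : Prop :=
  (n ≤ 0 ∨ n ≤ sol.length) ∧
  (sol.map (fun q => (q.1, q.2.1, q.2.2.1))).Nodup ∧
  ∀ i ∈ PySem.List.pyRange 0 n 1, ∀ j ∈ PySem.List.pyRange 0 n 1, ∀ v ∈ PySem.List.pyRange 0 n 1,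
    (∀ w ∈ PySem.List.pyRange 0 v 1, (i, j, w, 1) ∉ sol) →
      (i, j, v) ∈ sol.map (fun q => (q.1, q.2.1, q.2.2.1))
instance (sol : List (Int × Int × Int × Int)) (n : Int) : Decidable (Pre_obtain_sol sol n) := by unfold Pre_obtain_sol; infer_instance

def pvWitness_obtain_sol : (List (Int × Int × Int × Int)) × Int := ([(0, 0, 0, 1)], 1)

def Spec_obtain_sol (sol : List (Int × Int × Int × Int)) (n : Int) (out : List (List Int)) : Prop := out = obtain_sol_alt sol n
instance (sol : List (Int × Int × Int × Int)) (n : Int) (out : List (List Int)) : Decidable (Spec_obtain_sol sol n out) := by unfold Spec_obtain_sol; infer_instance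

-- ===== CLAIM (what is proved, stated in full; the proofs are below) =====
def Claim_equal_obtain_sol : Prop := ∀ (sol : List (Int × Int × Int × Int)) (n : Int), Dom_obtain_sol sol n → Pre_obtain_sol sol n → Spec_obtain_sol sol n (obtain_sol sol n)

-- ===== LEMMAS AND PROOFS =====

-- the value A's break loop stores: first v in vs with sol[i, j, v] == 1, as v + 1
def firstHit (sol : List (Int × Int × Int × Int)) (i j : Int) : List Int → Option Int
  | [] => none
  | v :: vs => if solGet sol i j v == 1 then some (v + 1) else firstHit sol i j vs

theorem loopA_eq_firstHit (sol : List (Int × Int × Int × Int)) (i j : Int) (vs : List Int) (M : List (List Int)) :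
    loopA sol i j vs M = match firstHit sol i j vs with
      | none => M | some w => setCell M i j w := by
  induction vs with
  | nil => rfl
  | cons v vs ih => simp only [loopA, firstHit]; split_ifs with h <;> simp [ih]

-- a fold of in-place writes over range m starting from a replicated value:
-- position k ends as f k z, positions ≥ m keep z
theorem foldl_set_replicate {α : Type} (z : α) (f : Nat → α → α) (s : List α → Nat → List α)
    (hs : ∀ (L : List α) (k : Nat), k < L.length → s L k = L.set k (f k (L.getD k z))) :
    ∀ (N m : Nat), m ≤ N →
      (List.range m).foldl s (List.replicate N z) =
        (List.range m).map (fun k => f k z) ++ List.replicate (N - m) z := by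
  intro N m
  induction m with
  | zero => simp
  | succ m ih =>
    intro hm
    rw [List.range_succ, List.foldl_append, ih (by omega), List.map_append]
    rw [List.foldl_cons, List.foldl_nil, hs _ m (by simp; omega)]
    have hrep : List.replicate (N - m) z = z :: List.replicate (N - (m + 1)) z := by
      have : N - m = (N - (m + 1)) + 1 := by omega
      rw [this, List.replicate_succ]
    have hget : ((List.range m).map (fun k => f k z) ++ List.replicate (N - m) z).getD m z = z := by
      rw [List.getD, List.getElem?_append_right (by simp), hrep]
      simp
    rw [hget, List.set_append_right _ _ (by simp), hrep]
    simp

theorem setCell_natCast (M : List (List Int)) (k : Nat) (j : Int) (x : Int) :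
    setCell M (k : Int) j x = M.set k (PySem.List.pySetD (M.getD k []) j x) := by
  simp [setCell, PySem.List.pySetD_natCast, PySem.List.pyGetD_natCast]

-- A's inner double loop over j touches only row k of M
theorem foldl_loopA_row (sol : List (Int × Int × Int × Int)) (k : Nat) (js : List Int) (z : List Int)
    (vs : List Int) (M : List (List Int)) (hk : k < M.length) :
    js.foldl (fun M j => loopA sol (k : Int) j vs M) M =
      M.set k (js.foldl (fun row j =>
        match firstHit sol (k : Int) j vs with
        | none => row
        | some w => PySem.List.pySetD row j w) (M.getD k z)) := by
  induction js generalizing M with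
  | nil =>
    simp only [List.foldl_nil, List.getD_eq_getElem M z hk, List.set_getElem_self]
  | cons j js ih =>
    simp only [List.foldl_cons]
    rw [loopA_eq_firstHit]
    cases h : firstHit sol (k : Int) j vs with
    | none => dsimp only; rw [ih M hk]
    | some w =>
      dsimp only
      rw [setCell_natCast]
      rw [ih _ (by simpa using hk)]
      rw [List.set_set]
      congr 1
      rw [List.getD_eq_getElem _ z (by simpa using hk), List.getElem_set_self (by simpa using hk),
          List.getD_eq_getElem M [] hk, List.getD_eq_getElem M z hk]

-- A's whole computation, cell by cell
theorem A_general (sol : List (Int × Int × Int × Int)) (vs : List Int) (n : Int) :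
    (PySem.List.pyRange 0 n 1).foldl (fun M i =>
        (PySem.List.pyRange 0 n 1).foldl (fun M j => loopA sol i j vs M) M)
      ((PySem.List.pyRange 0 n 1).map (fun _ => (PySem.List.pyRange 0 n 1).map (fun _ => (0 : Int))))
    = (List.range n.toNat).map (fun (k : Nat) => (List.range n.toNat).map (fun (m : Nat) =>
        match firstHit sol (k : Int) (m : Int) vs with
        | none => 0
        | some w => w)) := by
  rw [PySem.List.pyRange_zero n]
  simp only [List.map_const', List.length_map, List.length_range]
  rw [List.foldl_map]
  rw [foldl_set_replicate (List.replicate n.toNat 0)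
        (fun (k : Nat) (row : List Int) =>
          List.foldl (fun row j =>
            match firstHit sol (k : Int) j vs with
            | none => row
            | some w => PySem.List.pySetD row j w) row
            (List.map (fun (m : Nat) => (m : Int)) (List.range n.toNat)))
        _
        (fun L k hk => foldl_loopA_row sol k _ (List.replicate n.toNat 0) vs L hk)
        n.toNat n.toNat le_rfl]
  simp only [Nat.sub_self, List.replicate_zero, List.append_nil]
  refine List.map_congr_left (fun k hk => ?_)
  rw [List.foldl_map]
  rw [foldl_set_replicate (0 : Int)
        (fun m old => match firstHit sol (k : Int) (m : Int) vs with
          | none => old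
          | some w => w)
        _
        (fun row m hm => ?_)
        n.toNat n.toNat le_rfl]
  · simp only [Nat.sub_self, List.replicate_zero, List.append_nil]
  · cases h : firstHit sol (k : Int) (m : Int) vs with
    | none =>
      simp only [h]
      rw [List.getD_eq_getElem row 0 hm]
      exact (List.set_getElem_self hm).symm
    | some w =>
      simp only [h]
      rw [PySem.List.pySetD_natCast]

theorem minD_eq_getD_min? (xs : List Int) (d : Int) :
    PySem.List.minD xs (fun x => x) d = (PySem.List.min? xs (fun x => x)).getD d := by
  simp [PySem.List.minD]

-- min with identity key of a list whose head is strictly below the tail is the head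
theorem min?_cons_of_lt (x : Int) (t : List Int) (h : ∀ y ∈ t, x < y) :
    PySem.List.min? (x :: t) (fun y => y) = some x := by
  cases hm : PySem.List.min? (x :: t) (fun y => y) with
  | none => exact absurd ((PySem.List.min?_eq_none_iff _ _).mp hm) (by simp)
  | some m =>
    have hmem := PySem.List.min?_mem hm
    have hmin := PySem.List.min?_isMin hm x (by simp)
    rcases List.mem_cons.mp hmem with rfl | hmt
    · rfl
    · exact absurd hmin (by simpa using h m hmt)

-- A's break on a strictly increasing candidate list finds min of the matches (+1), default 0
theorem minD_filter_eq_firstHit (sol : List (Int × Int × Int × Int)) (i j : Int) :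
    ∀ vs : List Int, vs.Pairwise (· < ·) →
      PySem.List.minD ((vs.filter (fun v => solGet sol i j v == 1)).map (fun v => v + 1)) (fun x => x) 0 =
        match firstHit sol i j vs with
        | none => 0
        | some w => w := by
  intro vs hp
  induction vs with
  | nil => rfl
  | cons v vs ih =>
    rcases List.pairwise_cons.mp hp with ⟨hlt, hp'⟩
    by_cases h : solGet sol i j v == 1
    · simp only [firstHit, List.filter_cons, h, if_pos, List.map_cons]
      rw [minD_eq_getD_min?, min?_cons_of_lt]
      · rfl
      · intro y hy
        rcases List.mem_map.mp hy with ⟨w, hw, rfl⟩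
        have := hlt w (List.mem_of_mem_filter hw)
        omega
    · have hb : (solGet sol i j v == 1) = false := by simpa using h
      simp only [firstHit, List.filter_cons, hb, Bool.false_eq_true, if_false]
      exact ih hp'

-- ----- B side -----

-- the option-min step loopB performs on the cell (i, j) it touches
def omin (o : Option Int) (v : Int) : Option Int :=
  match o with
  | none => some v
  | some w => some (if v < w then v else w)

-- the candidate values loopB feeds into cell (i, j), in list order
def hitsB (n i j : Int) : List (Int × Int × Int × Int) → List Int
  | [] => []
  | (i', j', v, val) :: rest =>
    if val = 1 ∧ 0 ≤ i' ∧ i' < n ∧ 0 ≤ j' ∧ j' < n ∧ 0 ≤ v ∧ v < n ∧ i' = i ∧ j' = j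
    then v :: hitsB n i j rest else hitsB n i j rest

theorem mem_hitsB (n i j x : Int) (hi : 0 ≤ i) (hi2 : i < n) (hj : 0 ≤ j) (hj2 : j < n) :
    ∀ sol : List (Int × Int × Int × Int),
      x ∈ hitsB n i j sol ↔ ((i, j, x, 1) ∈ sol ∧ 0 ≤ x ∧ x < n) := by
  intro sol
  induction sol with
  | nil => simp [hitsB]
  | cons q rest ih =>
    obtain ⟨i', j', v, val⟩ := q
    simp only [hitsB]
    split_ifs with h
    · obtain ⟨h1, _, _, _, _, h6, h7, h8, h9⟩ := h
      simp only [List.mem_cons, ih, Prod.mk.injEq]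
      constructor
      · rintro (rfl | ⟨hm, hx⟩)
        · exact ⟨Or.inl ⟨h8.symm, h9.symm, rfl, h1.symm⟩, h6, h7⟩
        · exact ⟨Or.inr hm, hx⟩
      · rintro ⟨⟨_, _, he3, _⟩ | hm, hx⟩
        · exact Or.inl he3
        · exact Or.inr ⟨hm, hx⟩
    · rw [ih]
      constructor
      · rintro ⟨hm, hx⟩; exact ⟨List.mem_cons_of_mem _ hm, hx⟩
      · rintro ⟨hm, hx⟩
        rcases List.mem_cons.mp hm with heq | hm'
        · exfalso
          apply h
          simp only [Prod.mk.injEq] at heq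
          obtain ⟨h1, h2, h3, h4⟩ := heq
          refine ⟨h4.symm, ?_, ?_, ?_, ?_, ?_, ?_, h1.symm, h2.symm⟩ <;> omega
        · exact ⟨hm', hx⟩

-- loopB's effect on one cell is the omin-fold of its candidates
theorem get?_loopB (n i j : Int) :
    ∀ (sol : List (Int × Int × Int × Int)) (best : PySem.Dict (Int × Int) Int),
      (loopB n sol best).get? (i, j) = (hitsB n i j sol).foldl omin (best.get? (i, j)) := by
  intro sol
  induction sol with
  | nil => intro best; rfl
  | cons q rest ih =>
    intro best
    obtain ⟨i', j', v, val⟩ := q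
    by_cases hc : val = 1 ∧ 0 ≤ i' ∧ i' < n ∧ 0 ≤ j' ∧ j' < n ∧ 0 ≤ v ∧ v < n
    · by_cases hk : i' = i ∧ j' = j
      · obtain ⟨rfl, rfl⟩ := hk
        have hhits : hitsB n i' j' ((i', j', v, val) :: rest) = v :: hitsB n i' j' rest := by
          simp only [hitsB]
          rw [if_pos (by exact ⟨hc.1, hc.2.1, hc.2.2.1, hc.2.2.2.1, hc.2.2.2.2.1,
                hc.2.2.2.2.2.1, hc.2.2.2.2.2.2, trivial, trivial⟩)]
        have hloop : loopB n ((i', j', v, val) :: rest) best =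
            loopB n rest (if best.contains (i', j') = false ∨ v < best.getD (i', j') 0
              then best.insert (i', j') v else best) := by
          simp only [loopB]
          rw [if_pos hc]
        rw [hloop, hhits, List.foldl_cons, ih]
        congr 1
        cases hg : best.get? (i', j') with
        | none =>
          have hcont : best.contains (i', j') = false := by
            rw [PySem.Dict.contains_eq_isSome_get?, hg]; rfl
          rw [if_pos (Or.inl hcont), PySem.Dict.get?_insert_self]
          rfl
        | some w =>
          have hcont : best.contains (i', j') = true := by
            rw [PySem.Dict.contains_eq_isSome_get?, hg]; rfl
          have hgd : best.getD (i', j') 0 = w := by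
            rw [PySem.Dict.getD_eq_get?_getD, hg]; rfl
          by_cases hv : v < w
          · rw [if_pos (Or.inr (by rw [hgd]; exact hv)), PySem.Dict.get?_insert_self]
            simp [omin, hv]
          · rw [if_neg (by simp [hcont, hgd, hv]), hg]
            simp [omin, hv]
      · have hne : ((i, j) : Int × Int) ≠ (i', j') := by
          intro he
          simp only [Prod.mk.injEq] at he
          exact hk ⟨he.1.symm, he.2.symm⟩
        have hhits : hitsB n i j ((i', j', v, val) :: rest) = hitsB n i j rest := by
          simp only [hitsB]
          rw [if_neg (fun hh => hk ⟨hh.2.2.2.2.2.2.2.1, hh.2.2.2.2.2.2.2.2⟩)]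
        have hloop : loopB n ((i', j', v, val) :: rest) best =
            loopB n rest (if best.contains (i', j') = false ∨ v < best.getD (i', j') 0
              then best.insert (i', j') v else best) := by
          simp only [loopB]
          rw [if_pos hc]
        rw [hloop, hhits, ih]
        congr 1
        split_ifs with hb
        · exact PySem.Dict.get?_insert_of_ne _ _ hne
        · rfl
    · have hhits : hitsB n i j ((i', j', v, val) :: rest) = hitsB n i j rest := by
        simp only [hitsB]
        rw [if_neg (fun hh => hc ⟨hh.1, hh.2.1, hh.2.2.1, hh.2.2.2.1, hh.2.2.2.2.1,
              hh.2.2.2.2.2.1, hh.2.2.2.2.2.2.1⟩)]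
      have hloop : loopB n ((i', j', v, val) :: rest) best = loopB n rest best := by
        simp only [loopB]
        rw [if_neg hc]
      rw [hloop, hhits]
      exact ih best

theorem foldl_omin_some (L : List Int) : ∀ w : Int, L.foldl omin (some w) = some (L.foldl min w) := by
  induction L with
  | nil => intro w; rfl
  | cons x t ih =>
    intro w
    have : omin (some w) x = some (min w x) := by
      show some (if x < w then x else w) = some (min w x)
      congr 1
      omega
    rw [List.foldl_cons, List.foldl_cons, this, ih]

theorem foldl_min_spec (L : List Int) : ∀ w : Int,
    (L.foldl min w = w ∨ L.foldl min w ∈ L) ∧ L.foldl min w ≤ w ∧ ∀ y ∈ L, L.foldl min w ≤ y := by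
  induction L with
  | nil => intro w; exact ⟨Or.inl rfl, le_refl w, by simp⟩
  | cons x t ih =>
    intro w
    obtain ⟨hmem, hw, hall⟩ := ih (min w x)
    refine ⟨?_, ?_, ?_⟩
    · rcases hmem with h | h
      · rcases min_choice w x with hc | hc
        · exact Or.inl (by rw [List.foldl_cons, h, hc])
        · exact Or.inr (by rw [List.foldl_cons, h, hc]; simp)
      · exact Or.inr (List.mem_cons_of_mem x h)
    · exact le_trans hw (min_le_left w x)
    · intro y hy
      rcases List.mem_cons.mp hy with rfl | hyt
      · exact le_trans hw (min_le_right w y)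
      · exact hall y hyt

-- with unique keys, sol[i, j, v] == 1 means exactly that (i, j, v, 1) is an entry
theorem solGet_eq_one_iff (sol : List (Int × Int × Int × Int)) (i j v : Int)
    (hnd : (sol.map (fun q => (q.1, q.2.1, q.2.2.1))).Nodup) :
    solGet sol i j v = 1 ↔ (i, j, v, 1) ∈ sol := by
  constructor
  · intro h
    unfold solGet at h
    cases hf : sol.find? (fun q => q.1 == i && q.2.1 == j && q.2.2.1 == v) with
    | none => rw [hf] at h; simp at h
    | some q =>
      rw [hf] at h
      simp only [Option.map_some, Option.getD_some] at h
      have hq := List.find?_some hf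
      have hmem := List.mem_of_find?_eq_some hf
      obtain ⟨i', j', v', val⟩ := q
      simp only [Bool.and_eq_true, beq_iff_eq] at hq
      obtain ⟨⟨rfl, rfl⟩, rfl⟩ := hq
      rw [← h]
      exact hmem
  · intro hm
    unfold solGet
    cases hf : sol.find? (fun q => q.1 == i && q.2.1 == j && q.2.2.1 == v) with
    | none =>
      exact absurd hm (by
        intro hmem
        have := List.find?_eq_none.mp hf _ hmem
        simp at this)
    | some q =>
      have hq := List.find?_some hf
      have hmemq := List.mem_of_find?_eq_some hf
      obtain ⟨i', j', v', val⟩ := q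
      simp only [Bool.and_eq_true, beq_iff_eq] at hq
      obtain ⟨⟨rfl, rfl⟩, rfl⟩ := hq
      have := List.inj_on_of_nodup_map hnd hmemq hm rfl
      simp only [Prod.mk.injEq] at this
      simp [this.2.2.2]

-- B's cell equals A's cell (stated through the minD characterisation of A's break loop)
theorem cell_eq (sol : List (Int × Int × Int × Int)) (n i j : Int)
    (hnd : (sol.map (fun q => (q.1, q.2.1, q.2.2.1))).Nodup)
    (hi : 0 ≤ i) (hi2 : i < n) (hj : 0 ≤ j) (hj2 : j < n) :
    (loopB n sol PySem.Dict.empty).getD (i, j) (-1) + 1 =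
      PySem.List.minD (((PySem.List.pyRange 0 n 1).filter (fun v => solGet sol i j v == 1)).map
        (fun v => v + 1)) (fun x => x) 0 := by
  have hmemF : ∀ x : Int,
      x ∈ (PySem.List.pyRange 0 n 1).filter (fun v => solGet sol i j v == 1) ↔
        ((i, j, x, 1) ∈ sol ∧ 0 ≤ x ∧ x < n) := by
    intro x
    rw [List.mem_filter, PySem.List.mem_pyRange_one, beq_iff_eq, solGet_eq_one_iff sol i j x hnd]
    tauto
  have hHF : ∀ x : Int,
      x ∈ hitsB n i j sol ↔ x ∈ (PySem.List.pyRange 0 n 1).filter (fun v => solGet sol i j v == 1) := by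
    intro x; rw [mem_hitsB n i j x hi hi2 hj hj2 sol, hmemF]
  have hget : (loopB n sol PySem.Dict.empty).getD (i, j) (-1) =
      ((hitsB n i j sol).foldl omin none).getD (-1) := by
    rw [PySem.Dict.getD_eq_get?_getD, get?_loopB, PySem.Dict.get?_empty]
  cases hH : hitsB n i j sol with
  | nil =>
    have hF : (PySem.List.pyRange 0 n 1).filter (fun v => solGet sol i j v == 1) = [] := by
      rw [List.eq_nil_iff_forall_not_mem]
      intro x hx
      rw [← hHF] at hx
      simp [hH] at hx
    rw [hget, hH, hF]
    simp [PySem.List.minD, PySem.List.min?]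
  | cons h t =>
    rw [hget, hH, List.foldl_cons]
    have hsome : t.foldl omin (omin none h) = some (t.foldl min h) := foldl_omin_some t h
    obtain ⟨hmem, hle, hall⟩ := foldl_min_spec t h
    set m := t.foldl min h with hm
    have hmH : m ∈ hitsB n i j sol := by
      rw [hH]
      rcases hmem with h' | h'
      · exact h' ▸ List.mem_cons_self
      · exact List.mem_cons_of_mem h h'
    have hmleH : ∀ y ∈ hitsB n i j sol, m ≤ y := by
      intro y hy
      rw [hH] at hy
      rcases List.mem_cons.mp hy with rfl | hyt
      · exact hle
      · exact hall y hyt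
    have hmapmem : m + 1 ∈ ((PySem.List.pyRange 0 n 1).filter
        (fun v => solGet sol i j v == 1)).map (fun v => v + 1) :=
      List.mem_map.mpr ⟨m, (hHF m).mp hmH, rfl⟩
    cases hmin : PySem.List.min? (((PySem.List.pyRange 0 n 1).filter
        (fun v => solGet sol i j v == 1)).map (fun v => v + 1)) (fun x => x) with
    | none =>
      have := (PySem.List.min?_eq_none_iff _ _).mp hmin
      rw [this] at hmapmem
      simp at hmapmem
    | some m' =>
      have hm'mem := PySem.List.min?_mem hmin
      have hm'le : m' ≤ m + 1 := PySem.List.min?_isMin hmin (m + 1) hmapmem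
      obtain ⟨x, hxF, rfl⟩ := List.mem_map.mp hm'mem
      have hmx : m ≤ x := hmleH x ((hHF x).mpr hxF)
      have : x = m := by omega
      subst this
      rw [hsome, minD_eq_getD_min?, hmin]
      rfl

-- B's whole computation, cell by cell, matched to A's firstHit form
theorem B_char (sol : List (Int × Int × Int × Int)) (n : Int)
    (hnd : (sol.map (fun q => (q.1, q.2.1, q.2.2.1))).Nodup) :
    obtain_sol_alt sol n
    = (List.range n.toNat).map (fun (k : Nat) => (List.range n.toNat).map (fun (m : Nat) =>
        match firstHit sol (k : Int) (m : Int) (PySem.List.pyRange 0 n 1) with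
        | none => 0
        | some w => w)) := by
  unfold obtain_sol_alt
  rw [PySem.List.pyRange_zero n]
  simp only [List.map_map]
  refine List.map_congr_left (fun k hk => ?_)
  refine List.map_congr_left (fun m hm => ?_)
  have hk' : (k : Int) < n := by
    have := List.mem_range.mp hk
    omega
  have hm' : (m : Int) < n := by
    have := List.mem_range.mp hm
    omega
  simp only [Function.comp]
  rw [cell_eq sol n (k : Int) (m : Int) hnd (by positivity) hk' (by positivity) hm',
      ← PySem.List.pyRange_zero n]
  exact minD_filter_eq_firstHit sol (k : Int) (m : Int) _ (PySem.List.pairwise_lt_pyRange_one 0 n)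

-- ===== VERDICT (by name: the statement is the Claim_ definition above) =====
theorem obtain_sol_spec : Claim_equal_obtain_sol := by
  intro sol n _hd hp
  unfold Spec_obtain_sol
  rw [B_char sol n hp.2.1]
  exact A_general sol (PySem.List.pyRange 0 n 1) n
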